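-- pv_equiv track=rewrite | github.com/MrBrantCode/unitest_baseline | mut_generate/mist_train_taco/taco_1779/solution.py | find_smallest_k
-- ===== SOURCE A (Python) =====
-- def find_smallest_k(n, a):
--     """
--     Finds the smallest integer k such that the product of the first k elements of the sequence a
--     is equal to the product of the remaining elements.
--
--     Parameters:
--     n (int): The length of the sequence.
--     a (list of int): The sequence of integers, where each element is either 1 or 2.
--
--     Returns:
--     int: The smallest k that satisfies the condition, or -1 if no such k exists.
--     """
--     if a.count(2) == 0:
--         return 1
--     elif a.count(2) % 2 == 1:
--         return -1
--     else:
--         cnt = a.count(2) // 2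
--         i = 0
--         while cnt > 0:
--             if a[i] == 2:
--                 cnt -= 1
--             i += 1
--         return i
-- ===== SOURCE B (Python) =====
-- def find_smallest_k(n, a):
--     pos = [i for i, x in enumerate(a) if x == 2]
--     if not pos:
--         return 1
--     if len(pos) % 2 == 1:
--         return -1
--     return pos[len(pos) // 2 - 1] + 1
-- ===== Notes on version B (the rewrite author's own statement) =====
-- stated objective: simpler
-- what changed: B builds the index table of 2-positions once and returns pos[len(pos)//2-1]+1 by direct subscript, replacing A's three count(2) passes and its scan-until-counter-exhausted while loop.
import Mathlib
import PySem

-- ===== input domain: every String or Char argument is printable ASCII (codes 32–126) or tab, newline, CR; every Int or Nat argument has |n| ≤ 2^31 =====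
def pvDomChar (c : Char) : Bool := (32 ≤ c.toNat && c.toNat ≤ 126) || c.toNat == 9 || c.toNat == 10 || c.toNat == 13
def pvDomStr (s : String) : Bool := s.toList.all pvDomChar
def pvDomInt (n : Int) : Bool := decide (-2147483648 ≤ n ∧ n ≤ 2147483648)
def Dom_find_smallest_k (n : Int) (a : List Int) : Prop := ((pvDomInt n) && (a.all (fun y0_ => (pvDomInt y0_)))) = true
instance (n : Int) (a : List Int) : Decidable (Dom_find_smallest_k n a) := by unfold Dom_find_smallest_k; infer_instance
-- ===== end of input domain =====

-- B builds the index table of 2-positions once and indexes into it directly, replacing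
-- A's repeated count(2) passes and its scan-until-counter-exhausted while loop (objective: simpler).

-- ===== PORT A =====
-- the 'while cnt > 0' loop of A; the index i walks the list, so the port consumes the list while carrying i
def findLoopA : List Int → Int → Int → Int
  | [], _, i => i
  | x :: xs, cnt, i => if cnt > 0 then findLoopA xs (if x = 2 then cnt - 1 else cnt) (i + 1) else i

def find_smallest_k (n : Int) (a : List Int) : Int :=
  if (PySem.List.count a 2 : Int) = 0 then 1
  else if PySem.Int.mod (PySem.List.count a 2 : Int) 2 = 1 then -1
  else findLoopA a (PySem.Int.floordiv (PySem.List.count a 2 : Int) 2) 0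

-- ===== PORT B =====
def find_smallest_k_alt (n : Int) (a : List Int) : Int :=
  let pos := ((PySem.List.enumerate a 0).filter (fun p => p.2 == 2)).map (fun p => p.1)
  if pos = [] then 1
  else if pos.length % 2 = 1 then -1
  else (PySem.List.pyGet? pos (PySem.Int.floordiv (pos.length : Int) 2 - 1)).getD 0 + 1

-- ===== PRECONDITION & SPEC =====
def Spec_find_smallest_k (n : Int) (a : List Int) (out : Int) : Prop := out = find_smallest_k_alt n a
instance (n : Int) (a : List Int) (out : Int) : Decidable (Spec_find_smallest_k n a out) := by unfold Spec_find_smallest_k; infer_instance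

-- ===== CLAIM (what is proved, stated in full; the proofs are below) =====
def Claim_equal_find_smallest_k : Prop := ∀ (n : Int) (a : List Int), Dom_find_smallest_k n a → Spec_find_smallest_k n a (find_smallest_k n a)

-- ===== LEMMAS AND PROOFS =====

-- the index table B builds, with an arbitrary start offset so it recurses structurally
def posFrom (a : List Int) (s : Int) : List Int :=
  ((PySem.List.enumerate a s).filter (fun p => p.2 == 2)).map (fun p => p.1)

theorem posFrom_nil (s : Int) : posFrom [] s = [] := rfl

theorem posFrom_cons (x : Int) (xs : List Int) (s : Int) :
    posFrom (x :: xs) s = if x = 2 then s :: posFrom xs (s + 1) else posFrom xs (s + 1) := by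
  by_cases h : x = 2 <;>
    simp [posFrom, PySem.List.enumerate_cons, h]

theorem length_posFrom (a : List Int) (s : Int) : (posFrom a s).length = a.count 2 := by
  induction a generalizing s with
  | nil => rfl
  | cons x xs ih =>
    rw [posFrom_cons]
    by_cases h : x = 2 <;> simp [h, ih]

theorem findLoopA_zero (a : List Int) (i : Int) : findLoopA a 0 i = i := by
  cases a <;> simp [findLoopA]

theorem findLoopA_eq_posFrom (a : List Int) (s : Int) (k : Nat)
    (h1 : 1 ≤ k) (h2 : k ≤ (posFrom a s).length) :
    findLoopA a (k : Int) s = ((posFrom a s)[k - 1]?).getD 0 + 1 := by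
  induction a generalizing s k with
  | nil => simp [posFrom_nil] at h2; omega
  | cons x xs ih =>
    rw [posFrom_cons] at h2 ⊢
    by_cases hx : x = 2
    · rw [if_pos hx] at h2 ⊢
      simp only [findLoopA, if_pos hx]
      rw [if_pos (by exact_mod_cast h1)]
      rcases Nat.eq_or_lt_of_le h1 with h1' | h1'
      -- k = 1: the counter hits 0 and the loop stops at the next iteration
      · subst h1'
        norm_num [findLoopA_zero]
      -- k ≥ 2: use the IH on the tail with counter k - 1
      · have hk : ((k : Int) - 1) = ((k - 1 : Nat) : Int) := by omega
        rw [hk, ih (s + 1) (k - 1) (by omega) (by simp at h2; omega)]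
        have h3 : k - 1 = (k - 2) + 1 := by omega
        simp [h3]
    · rw [if_neg hx] at h2 ⊢
      simp only [findLoopA, if_neg hx]
      rw [if_pos (by exact_mod_cast h1)]
      exact ih (s + 1) k h1 h2

theorem pos_eq (a : List Int) :
    ((PySem.List.enumerate a 0).filter (fun p => p.2 == 2)).map (fun p => p.1) = posFrom a 0 := rfl

-- ===== VERDICT (by name: the statement is the Claim_ definition above) =====
theorem find_smallest_k_spec : Claim_equal_find_smallest_k := by
  intro n a _
  unfold Spec_find_smallest_k find_smallest_k find_smallest_k_alt
  have hcount : PySem.List.count a 2 = a.count 2 := PySem.List.count_eq a 2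
  have hlen : (((PySem.List.enumerate a 0).filter (fun p => p.2 == 2)).map (fun p => p.1)).length
      = a.count 2 := length_posFrom a 0
  have hmod2 : PySem.Int.mod ((a.count 2 : Nat) : Int) 2 = ((a.count 2 % 2 : Nat) : Int) := by
    rw [PySem.Int.mod_eq_emod_of_pos (by norm_num)]; omega
  have hdiv2 : PySem.Int.floordiv ((a.count 2 : Nat) : Int) 2 = ((a.count 2 / 2 : Nat) : Int) := by
    rw [PySem.Int.floordiv_eq_ediv_of_pos (by norm_num)]; omega
  simp only [hcount, hlen, hmod2, hdiv2]
  by_cases h0 : a.count 2 = 0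
  · have hnil : posFrom a 0 = [] := List.eq_nil_of_length_eq_zero (by rw [length_posFrom]; omega)
    rw [if_pos (by exact_mod_cast h0)]
    rw [pos_eq, hnil]
    simp
  · have hne : ¬ (((PySem.List.enumerate a 0).filter (fun p => p.2 == 2)).map (fun p => p.1)) = [] := by
      intro h
      have := hlen
      rw [h] at this
      simp at this
      omega
    rw [if_neg (by intro h; exact h0 (by exact_mod_cast h)), if_neg hne]
    by_cases hodd : a.count 2 % 2 = 1
    · rw [if_pos (by exact_mod_cast hodd), if_pos hodd]
    · rw [if_neg (by intro h; exact hodd (by exact_mod_cast h)), if_neg hodd]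
      have hk1 : 1 ≤ a.count 2 / 2 := by omega
      have hk2 : a.count 2 / 2 ≤ (posFrom a 0).length := by rw [length_posFrom]; omega
      rw [pos_eq, findLoopA_eq_posFrom a 0 (a.count 2 / 2) hk1 hk2]
      have hidx : ((a.count 2 / 2 : Nat) : Int) - 1 = ((a.count 2 / 2 - 1 : Nat) : Int) := by omega
      rw [hidx, PySem.List.pyGet?_natCast]
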